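-- pv_equiv track=rewrite | github.com/pypi-data/pypi-mirror-392 | packages/ziyo-lang/ziyo_lang-1.0.1.tar.gz/ziyo_lang-1.0.1/ziyo_lang/compiler.py | _remove_semicolons
-- ===== SOURCE A (Python) =====
-- def _remove_semicolons(code: str) -> str:
--     """Oxirgi semicolonlarni o'chirish (string literal'dan boshqa)"""
--     lines = code.splitlines()
--     cleaned_lines = []
--
--     for line in lines:
--         if not line.strip():
--             cleaned_lines.append("")
--             continue
--
--         in_string = False
--         quote_char = None
--         cleaned_line = ""
--         i = 0
--
--         while i < len(line):
--             char = line[i]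
--
--             if char in ('"', "'") and not in_string:
--                 in_string = True
--                 quote_char = char
--             elif char == quote_char and in_string:
--
--                 if i + 1 < len(line) and line[i + 1] == quote_char:
--                     i += 1
--                 else:
--                     in_string = False
--             elif char == ';' and not in_string:
--                 break
--
--             cleaned_line += char
--             i += 1
--
--         cleaned_lines.append(cleaned_line)
--
--     return "\n".join(cleaned_lines)
-- ===== SOURCE B (Python) =====
-- def _remove_semicolons(code: str) -> str:
--     """Per line: copy chunks up to the first semicolon outside string literals,
--     jumping over string-literal bodies with str.find instead of walking char by char
--     (a doubled closing quote inside a literal is copied once, as the original does)."""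
--     cleaned_lines = []
--     for line in code.splitlines():
--         if not line.strip():
--             cleaned_lines.append("")
--             continue
--         n = len(line)
--         parts = []
--         i = 0
--         while i < n:
--             c = line[i]
--             if c == ';':
--                 break
--             parts.append(c)
--             i += 1
--             if c in ('"', "'"):
--                 # inside a literal quoted by c: jump from quote to quote
--                 while i < n:
--                     j = line.find(c, i)
--                     if j == -1:
--                         parts.append(line[i:])
--                         i = n
--                     else:
--                         parts.append(line[i:j])
--                         parts.append(c)
--                         if j + 1 < n and line[j + 1] == c:
--                             i = j + 2  # doubled quote: emitted once, literal continues
--                         else: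
--                             i = j + 1
--                             break
--         cleaned_lines.append("".join(parts))
--     return "\n".join(cleaned_lines)
-- ===== Notes on version B (the rewrite author's own statement) =====
-- stated objective: faster
-- what changed: Replaces A's per-character in_string/quote_char state machine, which grows cleaned_line by repeated string concatenation, with a two-level pass that copies chunks into a list joined once: the outer loop copies plain characters and stops at the first semicolon outside a literal, and string-literal bodies are skipped chunk-wise by jumping from quote to quote with str.find (a doubled closing quote is emitted once, exactly as A does).
import Mathlib
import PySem

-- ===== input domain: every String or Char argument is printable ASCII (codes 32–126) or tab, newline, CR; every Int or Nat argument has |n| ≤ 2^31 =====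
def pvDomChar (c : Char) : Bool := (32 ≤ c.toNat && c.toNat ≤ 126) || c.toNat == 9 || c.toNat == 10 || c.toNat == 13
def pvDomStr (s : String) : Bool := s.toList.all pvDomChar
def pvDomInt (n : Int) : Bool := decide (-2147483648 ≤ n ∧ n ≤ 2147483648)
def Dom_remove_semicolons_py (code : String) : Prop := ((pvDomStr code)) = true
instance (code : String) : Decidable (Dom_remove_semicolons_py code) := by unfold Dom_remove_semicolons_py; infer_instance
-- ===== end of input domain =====

-- B rewrites A's per-character state machine (repeated string concatenation) as a chunk
-- copier that jumps from quote to quote with str.find and joins the chunks once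
-- (objective: faster; measured faster in a timing run).
-- Both while-loops are ported with a fuel counter (a totality guard only: the index grows
-- every iteration, so fuel = ln.length is never exhausted while i < ln.length).

-- ===== PORT A =====
-- A's inner while loop: index i, in_string flag, quote_char, accumulated cleaned_line.
def pvLineA (ln : List Char) : Nat → Nat → Bool → Option Char → List Char → List Char
  | 0, _, _, _, acc => acc
  | fuel + 1, i, instr, q, acc =>
    if h : i < ln.length then
      if (ln[i] = '"' ∨ ln[i] = '\'') ∧ instr = false then
        pvLineA ln fuel (i + 1) true (some ln[i]) (acc ++ [ln[i]])
      else if some ln[i] = q ∧ instr = true then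
        if i + 1 < ln.length ∧ ln[i + 1]? = some ln[i] then
          pvLineA ln fuel (i + 2) instr q (acc ++ [ln[i]])
        else pvLineA ln fuel (i + 1) false q (acc ++ [ln[i]])
      else if ln[i] = ';' ∧ instr = false then acc
      else pvLineA ln fuel (i + 1) instr q (acc ++ [ln[i]])
    else acc

def remove_semicolons_py (code : String) : String :=
  String.ofList (PySem.Chars.join ['\n']
    ((PySem.Chars.splitlines code.toList).foldl (fun cl ln =>
      if PySem.Chars.strip ln = [] then cl ++ [([] : List Char)]
      else cl ++ [pvLineA ln ln.length 0 false none []]) []))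

-- ===== PORT B =====
-- B's inner while loop: copy the body of a literal quoted by c chunk-wise via str.find.
def pvCopyB (ln : List Char) (c : Char) : Nat → Nat → List Char → List Char × Nat
  | 0, i, parts => (parts, i)
  | fuel + 1, i, parts =>
    if i < ln.length then
      if PySem.Chars.findFrom ln [c] (i : Int) = -1 then
        (parts ++ PySem.List.slice ln (some (i : Int)) none, ln.length)
      else if (PySem.Chars.findFrom ln [c] (i : Int)).toNat + 1 < ln.length ∧
          ln[(PySem.Chars.findFrom ln [c] (i : Int)).toNat + 1]? = some c then
        pvCopyB ln c fuel ((PySem.Chars.findFrom ln [c] (i : Int)).toNat + 2)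
          (parts ++ PySem.List.slice ln (some (i : Int)) (some (PySem.Chars.findFrom ln [c] (i : Int))) ++ [c])
      else
        (parts ++ PySem.List.slice ln (some (i : Int)) (some (PySem.Chars.findFrom ln [c] (i : Int))) ++ [c],
         (PySem.Chars.findFrom ln [c] (i : Int)).toNat + 1)
    else (parts, i)

-- B's outer while loop: copy plain characters; stop at the first semicolon; hand literals to pvCopyB.
def pvLineB (ln : List Char) : Nat → Nat → List Char → List Char
  | 0, _, parts => parts
  | fuel + 1, i, parts =>
    if h : i < ln.length then
      if ln[i] = ';' then parts
      else if ln[i] = '"' ∨ ln[i] = '\'' then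
        pvLineB ln fuel (pvCopyB ln ln[i] ln.length (i + 1) (parts ++ [ln[i]])).2
          (pvCopyB ln ln[i] ln.length (i + 1) (parts ++ [ln[i]])).1
      else pvLineB ln fuel (i + 1) (parts ++ [ln[i]])
    else parts

def remove_semicolons_py_alt (code : String) : String :=
  String.ofList (PySem.Chars.join ['\n']
    ((PySem.Chars.splitlines code.toList).foldl (fun cl ln =>
      if PySem.Chars.strip ln = [] then cl ++ [([] : List Char)]
      else cl ++ [pvLineB ln ln.length 0 []]) []))

-- ===== PRECONDITION & SPEC =====
def Spec_remove_semicolons_py (code : String) (out : String) : Prop := out = remove_semicolons_py_alt code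
instance (code : String) (out : String) : Decidable (Spec_remove_semicolons_py code out) := by unfold Spec_remove_semicolons_py; infer_instance

-- ===== CLAIM (what is proved, stated in full; the proofs are below) =====
def Claim_equal_remove_semicolons_py : Prop := ∀ (code : String), Dom_remove_semicolons_py code → Spec_remove_semicolons_py code (remove_semicolons_py code)

-- ===== LEMMAS AND PROOFS =====

lemma pvLineA_succ (ln : List Char) (fuel i : Nat) (instr : Bool) (q : Option Char) (acc : List Char) :
    pvLineA ln (fuel + 1) i instr q acc =
      if h : i < ln.length then
        if (ln[i] = '"' ∨ ln[i] = '\'') ∧ instr = false then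
          pvLineA ln fuel (i + 1) true (some ln[i]) (acc ++ [ln[i]])
        else if some ln[i] = q ∧ instr = true then
          if i + 1 < ln.length ∧ ln[i + 1]? = some ln[i] then
            pvLineA ln fuel (i + 2) instr q (acc ++ [ln[i]])
          else pvLineA ln fuel (i + 1) false q (acc ++ [ln[i]])
        else if ln[i] = ';' ∧ instr = false then acc
        else pvLineA ln fuel (i + 1) instr q (acc ++ [ln[i]])
      else acc := rfl

lemma pvCopyB_succ (ln : List Char) (c : Char) (fuel i : Nat) (parts : List Char) :
    pvCopyB ln c (fuel + 1) i parts =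
      if i < ln.length then
        if PySem.Chars.findFrom ln [c] (i : Int) = -1 then
          (parts ++ PySem.List.slice ln (some (i : Int)) none, ln.length)
        else if (PySem.Chars.findFrom ln [c] (i : Int)).toNat + 1 < ln.length ∧
            ln[(PySem.Chars.findFrom ln [c] (i : Int)).toNat + 1]? = some c then
          pvCopyB ln c fuel ((PySem.Chars.findFrom ln [c] (i : Int)).toNat + 2)
            (parts ++ PySem.List.slice ln (some (i : Int)) (some (PySem.Chars.findFrom ln [c] (i : Int))) ++ [c])
        else
          (parts ++ PySem.List.slice ln (some (i : Int)) (some (PySem.Chars.findFrom ln [c] (i : Int))) ++ [c],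
           (PySem.Chars.findFrom ln [c] (i : Int)).toNat + 1)
      else (parts, i) := rfl

lemma pvLineB_succ (ln : List Char) (fuel i : Nat) (parts : List Char) :
    pvLineB ln (fuel + 1) i parts =
      if h : i < ln.length then
        if ln[i] = ';' then parts
        else if ln[i] = '"' ∨ ln[i] = '\'' then
          pvLineB ln fuel (pvCopyB ln ln[i] ln.length (i + 1) (parts ++ [ln[i]])).2
            (pvCopyB ln ln[i] ln.length (i + 1) (parts ++ [ln[i]])).1
        else pvLineB ln fuel (i + 1) (parts ++ [ln[i]])
      else parts := rfl

lemma pvLineA_exit (ln : List Char) (fuel i : Nat) (instr : Bool) (q : Option Char)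
    (acc : List Char) (hi : ¬ i < ln.length) : pvLineA ln fuel i instr q acc = acc := by
  cases fuel with
  | zero => rfl
  | succ fuel => rw [pvLineA_succ, dif_neg hi]

lemma pvCopyB_exit (ln : List Char) (c : Char) (fuel i : Nat) (parts : List Char)
    (hi : ¬ i < ln.length) : pvCopyB ln c fuel i parts = (parts, i) := by
  cases fuel with
  | zero => rfl
  | succ fuel => rw [pvCopyB_succ, if_neg hi]

lemma pvLineB_exit (ln : List Char) (fuel i : Nat) (parts : List Char)
    (hi : ¬ i < ln.length) : pvLineB ln fuel i parts = parts := by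
  cases fuel with
  | zero => rfl
  | succ fuel => rw [pvLineB_succ, dif_neg hi]

lemma pv_infix_singleton (q : Char) (s : List Char) : [q] <:+: s ↔ q ∈ s := by
  constructor
  · intro h; exact h.mem (by simp)
  · intro h
    rcases List.mem_iff_append.mp h with ⟨t, u, rfl⟩
    exact ⟨t, u, by simp⟩

lemma pv_find_cons_ne (c q : Char) (t : List Char) (hne : c ≠ q) :
    PySem.Chars.find (c :: t) [q] =
      if PySem.Chars.find t [q] = -1 then -1 else 1 + PySem.Chars.find t [q] := by
  by_cases hin : q ∈ t
  · have ht : 0 ≤ PySem.Chars.find t [q] :=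
      (PySem.Chars.find_nonneg_iff t [q]).mpr ((pv_infix_singleton q t).mpr hin)
    have hct : 0 ≤ PySem.Chars.find (c :: t) [q] :=
      (PySem.Chars.find_nonneg_iff _ _).mpr ((pv_infix_singleton q _).mpr (by simp [hin]))
    obtain ⟨hpre, hmin⟩ := PySem.Chars.find_spec (s := c :: t) (sub := [q]) hct
    obtain ⟨hpre', hmin'⟩ := PySem.Chars.find_spec (s := t) (sub := [q]) ht
    have hK0 : (PySem.Chars.find (c :: t) [q]).toNat ≠ 0 := by
      intro h0
      rw [h0] at hpre
      simp at hpre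
      exact hne hpre.symm
    obtain ⟨K', hK⟩ : ∃ K', (PySem.Chars.find (c :: t) [q]).toNat = K' + 1 :=
      ⟨(PySem.Chars.find (c :: t) [q]).toNat - 1, by omega⟩
    rw [hK] at hpre hmin
    have h1 : (PySem.Chars.find t [q]).toNat ≤ K' := by
      by_contra hlt
      exact (hmin' K' (by omega)) (by simpa using hpre)
    have h2 : K' ≤ (PySem.Chars.find t [q]).toNat := by
      by_contra hlt
      exact (hmin ((PySem.Chars.find t [q]).toNat + 1) (by omega)) (by simpa using hpre')
    rw [if_neg (by omega)]
    omega
  · have h1 : PySem.Chars.find t [q] = -1 :=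
      (PySem.Chars.find_eq_neg_one_iff t [q]).mpr (fun hc => hin ((pv_infix_singleton q t).mp hc))
    have h2 : PySem.Chars.find (c :: t) [q] = -1 := by
      rw [PySem.Chars.find_eq_neg_one_iff]
      intro hc
      have hm := (pv_infix_singleton q _).mp hc
      simp at hm
      rcases hm with hm | hm
      · exact hne hm.symm
      · exact hin hm
    rw [h1, if_pos rfl, h2]

lemma pv_find_hit (ln : List Char) (q : Char) (i : Nat) (h : i < ln.length)
    (hq : ln[i] = q) : PySem.Chars.findFrom ln [q] (i : Int) = (i : Int) := by
  have hdrop : ln.drop i = q :: ln.drop (i + 1) := by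
    rw [List.drop_eq_getElem_cons h, hq]
  have hfind : PySem.Chars.find (ln.drop i) [q] = 0 := by
    have hnn : 0 ≤ PySem.Chars.find (ln.drop i) [q] :=
      (PySem.Chars.find_nonneg_iff _ _).mpr ((pv_infix_singleton _ _).mpr (by rw [hdrop]; simp))
    obtain ⟨hpre, hmin⟩ := PySem.Chars.find_spec hnn
    by_contra hne
    exact (hmin 0 (by omega)) (by rw [hdrop]; simp)
  rw [PySem.Chars.findFrom_natCast ln [q] i (by omega), hfind]
  norm_num

lemma pv_find_skip (ln : List Char) (q : Char) (i : Nat) (h : i < ln.length)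
    (hne : ln[i] ≠ q) :
    PySem.Chars.findFrom ln [q] (i : Int) = PySem.Chars.findFrom ln [q] ((i + 1 : Nat) : Int) := by
  have hdrop : ln.drop i = ln[i] :: ln.drop (i + 1) := List.drop_eq_getElem_cons h
  rw [PySem.Chars.findFrom_natCast ln [q] i (by omega),
      PySem.Chars.findFrom_natCast ln [q] (i + 1) (by omega),
      hdrop, pv_find_cons_ne _ _ _ hne]
  by_cases h1 : PySem.Chars.find (ln.drop (i + 1)) [q] = -1
  · simp [h1]
  · have hnn : 0 ≤ PySem.Chars.find (ln.drop (i + 1)) [q] := by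
      have := PySem.Chars.neg_one_le_find (ln.drop (i + 1)) [q]
      omega
    rw [if_neg h1, if_neg (by omega), if_neg h1]
    push_cast
    ring

lemma pvCopyB_fuel (ln : List Char) (c : Char) : ∀ (m i f f' : Nat) (parts : List Char),
    ln.length - i ≤ m → ln.length ≤ f + i → ln.length ≤ f' + i →
    pvCopyB ln c f i parts = pvCopyB ln c f' i parts := by
  intro m
  induction m with
  | zero =>
    intro i f f' parts hm hf hf'
    have hi : ¬ i < ln.length := by omega
    rw [pvCopyB_exit ln c f i parts hi, pvCopyB_exit ln c f' i parts hi]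
  | succ m ih =>
    intro i f f' parts hm hf hf'
    by_cases hi : i < ln.length
    · obtain ⟨f, rfl⟩ : ∃ k, f = k + 1 := ⟨f - 1, by omega⟩
      obtain ⟨f', rfl⟩ : ∃ k, f' = k + 1 := ⟨f' - 1, by omega⟩
      rw [pvCopyB_succ, pvCopyB_succ, if_pos hi, if_pos hi]
      by_cases hj : PySem.Chars.findFrom ln [c] (i : Int) = -1
      · rw [if_pos hj, if_pos hj]
      · have hge : (i : Int) ≤ PySem.Chars.findFrom ln [c] (i : Int) :=
          (PySem.Chars.findFrom_natCast_spec ln [c] i (by omega) hj).1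
        rw [if_neg hj, if_neg hj]
        by_cases hd : (PySem.Chars.findFrom ln [c] (i : Int)).toNat + 1 < ln.length ∧
            ln[(PySem.Chars.findFrom ln [c] (i : Int)).toNat + 1]? = some c
        · rw [if_pos hd, if_pos hd]
          exact ih _ f f' _ (by omega) (by omega) (by omega)
        · rw [if_neg hd, if_neg hd]
    · rw [pvCopyB_exit ln c f i parts hi, pvCopyB_exit ln c f' i parts hi]

lemma pv_copy_step (ln : List Char) (q : Char) (f i : Nat) (acc : List Char)
    (h : i < ln.length) (hf : ln.length ≤ f + (i + 1)) (hne : ln[i] ≠ q) :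
    pvCopyB ln q (f + 1) i acc = pvCopyB ln q f (i + 1) (acc ++ [ln[i]]) := by
  have hskip := pv_find_skip ln q i h hne
  have hdrop : ln.drop i = ln[i] :: ln.drop (i + 1) := List.drop_eq_getElem_cons h
  by_cases h1 : i + 1 < ln.length
  · obtain ⟨f, rfl⟩ : ∃ k, f = k + 1 := ⟨f - 1, by omega⟩
    conv_lhs => rw [pvCopyB_succ]
    conv_rhs => rw [pvCopyB_succ]
    rw [if_pos h, if_pos h1, hskip]
    by_cases hj : PySem.Chars.findFrom ln [q] ((i + 1 : Nat) : Int) = -1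
    · rw [if_pos hj, if_pos hj, PySem.List.slice_from_natCast, PySem.List.slice_from_natCast,
        hdrop]
      simp
    · rw [if_neg hj, if_neg hj]
      have hge : ((i + 1 : Nat) : Int) ≤ PySem.Chars.findFrom ln [q] ((i + 1 : Nat) : Int) :=
        (PySem.Chars.findFrom_natCast_spec ln [q] (i + 1) (by omega) hj).1
      have htn : PySem.Chars.findFrom ln [q] ((i + 1 : Nat) : Int) =
          (((PySem.Chars.findFrom ln [q] ((i + 1 : Nat) : Int)).toNat : Nat) : Int) := by
        omega
      have hsl : PySem.List.slice ln (some (i : Int))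
            (some (PySem.Chars.findFrom ln [q] ((i + 1 : Nat) : Int))) =
          ln[i] :: PySem.List.slice ln (some ((i + 1 : Nat) : Int))
            (some (PySem.Chars.findFrom ln [q] ((i + 1 : Nat) : Int))) := by
        rw [htn, PySem.List.slice_natCast, PySem.List.slice_natCast, hdrop]
        rw [show (PySem.Chars.findFrom ln [q] ((i + 1 : Nat) : Int)).toNat - i
              = ((PySem.Chars.findFrom ln [q] ((i + 1 : Nat) : Int)).toNat - (i + 1)) + 1 by omega]
        rw [List.take_succ_cons]
      rw [hsl]
      by_cases hd : (PySem.Chars.findFrom ln [q] ((i + 1 : Nat) : Int)).toNat + 1 < ln.length ∧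
          ln[(PySem.Chars.findFrom ln [q] ((i + 1 : Nat) : Int)).toNat + 1]? = some q
      · rw [if_pos hd, if_pos hd]
        rw [show acc ++ (ln[i] :: PySem.List.slice ln (some ((i + 1 : Nat) : Int))
              (some (PySem.Chars.findFrom ln [q] ((i + 1 : Nat) : Int))) )
            = (acc ++ [ln[i]]) ++ PySem.List.slice ln (some ((i + 1 : Nat) : Int))
              (some (PySem.Chars.findFrom ln [q] ((i + 1 : Nat) : Int))) by simp]
        exact pvCopyB_fuel ln q (ln.length - i) _ (f + 1) f _ (by omega) (by omega) (by omega)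
      · rw [if_neg hd, if_neg hd]
        simp
  · have hi1 : ¬ i + 1 < ln.length := h1
    have hfr : PySem.Chars.findFrom ln [q] ((i + 1 : Nat) : Int) = -1 := by
      rw [PySem.Chars.findFrom_natCast ln [q] (i + 1) (by omega)]
      rw [List.drop_eq_nil_of_le (by omega : ln.length ≤ i + 1)]
      rw [if_pos ((PySem.Chars.find_eq_neg_one_iff _ _).mpr (by simp))]
    rw [pvCopyB_succ, if_pos h, hskip, if_pos hfr, PySem.List.slice_from_natCast, hdrop,
      List.drop_eq_nil_of_le (by omega : ln.length ≤ i + 1),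
      pvCopyB_exit ln q f (i + 1) (acc ++ [ln[i]]) hi1]
    have hlen : ln.length = i + 1 := by omega
    simp [hlen]

lemma pv_main (ln : List Char) : ∀ (m i : Nat) (acc : List Char), ln.length - i ≤ m →
    (∀ (fa fb : Nat) (q : Option Char), ln.length ≤ fa + i → ln.length ≤ fb + i →
      pvLineA ln fa i false q acc = pvLineB ln fb i acc) ∧
    (∀ (fa fb fc : Nat) (q : Char), ln.length ≤ fa + i → ln.length ≤ fb + i → ln.length ≤ fc + i →
      pvLineA ln fa i true (some q) acc =
        pvLineB ln fb (pvCopyB ln q fc i acc).2 (pvCopyB ln q fc i acc).1) := by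
  intro m
  induction m with
  | zero =>
    intro i acc hm
    have hi : ¬ i < ln.length := by omega
    refine ⟨fun fa fb q _ _ => ?_, fun fa fb fc q _ _ _ => ?_⟩
    · rw [pvLineA_exit ln fa i false q acc hi, pvLineB_exit ln fb i acc hi]
    · rw [pvLineA_exit ln fa i true (some q) acc hi, pvCopyB_exit ln q fc i acc hi]
      show acc = pvLineB ln fb i acc
      rw [pvLineB_exit ln fb i acc hi]
  | succ m ih =>
    intro i acc hm
    by_cases hlt : i < ln.length
    case neg =>
      refine ⟨fun fa fb q _ _ => ?_, fun fa fb fc q _ _ _ => ?_⟩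
      · rw [pvLineA_exit ln fa i false q acc hlt, pvLineB_exit ln fb i acc hlt]
      · rw [pvLineA_exit ln fa i true (some q) acc hlt, pvCopyB_exit ln q fc i acc hlt]
        show acc = pvLineB ln fb i acc
        rw [pvLineB_exit ln fb i acc hlt]
    case pos =>
      constructor
      · -- outside a string literal
        intro fa fb q hfa hfb
        obtain ⟨fa, rfl⟩ : ∃ k, fa = k + 1 := ⟨fa - 1, by omega⟩
        obtain ⟨fb, rfl⟩ : ∃ k, fb = k + 1 := ⟨fb - 1, by omega⟩
        rw [pvLineA_succ, pvLineB_succ, dif_pos hlt, dif_pos hlt]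
        by_cases hq : ln[i] = '"' ∨ ln[i] = '\''
        · have hsemi : ¬ ln[i] = ';' := by rcases hq with h | h <;> rw [h] <;> decide
          rw [if_pos ⟨hq, rfl⟩, if_neg hsemi, if_pos hq]
          exact (ih (i + 1) (acc ++ [ln[i]]) (by omega)).2 fa fb ln.length ln[i]
            (by omega) (by omega) (by omega)
        · rw [if_neg (by simp [hq]), if_neg (by simp)]
          by_cases hsemi : ln[i] = ';'
          · rw [if_pos ⟨hsemi, rfl⟩, if_pos hsemi]
          · rw [if_neg (by simp [hsemi]), if_neg hsemi, if_neg hq]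
            exact (ih (i + 1) (acc ++ [ln[i]]) (by omega)).1 fa fb q (by omega) (by omega)
      · -- inside a string literal quoted by q
        intro fa fb fc q hfa hfb hfc
        obtain ⟨fa, rfl⟩ : ∃ k, fa = k + 1 := ⟨fa - 1, by omega⟩
        obtain ⟨fc, rfl⟩ : ∃ k, fc = k + 1 := ⟨fc - 1, by omega⟩
        by_cases hcq : ln[i] = q
        · have hfr := pv_find_hit ln q i hlt hcq
          rw [pvLineA_succ, dif_pos hlt, if_neg (by simp), if_pos ⟨by rw [hcq], rfl⟩]
          conv_rhs => rw [pvCopyB_succ]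
          rw [hfr, if_pos hlt, if_neg (by omega : ¬ ((i : Nat) : Int) = -1)]
          have hsl : PySem.List.slice ln (some (i : Int)) (some (i : Int)) = [] := by
            rw [PySem.List.slice_natCast]; simp
          rw [hsl]
          simp only [Int.toNat_natCast, List.append_nil, hcq]
          by_cases hd : i + 1 < ln.length ∧ ln[i + 1]? = some q
          · rw [if_pos hd, if_pos hd]
            exact (ih (i + 2) (acc ++ [q]) (by omega)).2 fa fb fc q (by omega) (by omega) (by omega)
          · rw [if_neg hd, if_neg hd]
            show pvLineA ln fa (i + 1) false (some q) (acc ++ [q]) = pvLineB ln fb (i + 1) (acc ++ [q])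
            exact (ih (i + 1) (acc ++ [q]) (by omega)).1 fa fb (some q) (by omega) (by omega)
        · rw [pvLineA_succ, dif_pos hlt, if_neg (by simp), if_neg (by simp [hcq]),
            if_neg (by simp), pv_copy_step ln q fc i acc hlt (by omega) hcq]
          exact (ih (i + 1) (acc ++ [ln[i]]) (by omega)).2 fa fb fc q (by omega) (by omega) (by omega)

lemma pv_line_eq (ln : List Char) :
    pvLineA ln ln.length 0 false none [] = pvLineB ln ln.length 0 [] :=
  (pv_main ln ln.length 0 [] (by omega)).1 ln.length ln.length none (by omega) (by omega)

-- ===== VERDICT (by name: the statement is the Claim_ definition above) =====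
theorem remove_semicolons_py_spec : Claim_equal_remove_semicolons_py := by
  intro code _
  unfold Spec_remove_semicolons_py remove_semicolons_py remove_semicolons_py_alt
  have hfun : (fun (cl : List (List Char)) (ln : List Char) =>
        if PySem.Chars.strip ln = [] then cl ++ [([] : List Char)]
        else cl ++ [pvLineA ln ln.length 0 false none []]) =
      (fun (cl : List (List Char)) (ln : List Char) =>
        if PySem.Chars.strip ln = [] then cl ++ [([] : List Char)]
        else cl ++ [pvLineB ln ln.length 0 []]) := by
    funext cl ln
    by_cases hs : PySem.Chars.strip ln = [] <;> simp [hs, pv_line_eq]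
  rw [hfun]
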